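-- pv_equiv track=rewrite | github.com/yesinidulij/cpsolutions | pythonProject2/68287928.py | solve
-- ===== SOURCE A (Python) =====
-- def solve(n,m,k,arr):
--     if m < k:
--         return 'NO'
--
--     arr.sort()
--     curr_mex = 0
--     count = 0
--
--     for i in range(n):
--         if arr[i] == k:
--             continue
--
--         if arr[i] > k:
--             break
--
--         if arr[i] == curr_mex:
--             curr_mex += 1
--
--         count += 1
--
--     if curr_mex != k:
--         return 'NO'
--
--     if count >= m:
--         return 'YES'
--
--     for i in range(n-1,-1,-1):
--         if arr[i] > k:
--             count += 1
--         else: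
--             break
--
--     if count >= m:
--         return 'YES'
--
--     return 'NO'
-- ===== SOURCE B (Python) =====
-- def solve(n, m, k, arr):
--     if m < k or k < 0:
--         return 'NO'
--     smallest = sorted(arr)[:max(n, 0)]
--     present = set(x for x in smallest if 0 <= x < k)
--     if len(present) < k:
--         return 'NO'
--     others = sum(1 for x in smallest if x != k)
--     return 'YES' if others >= m else 'NO'
-- ===== Notes on version B (the rewrite author's own statement) =====
-- stated objective: simpler
-- what changed: B replaces A's two index loops with break/continue and a running-mex state machine by closed-form counting on the sorted prefix: a set of the values in [0,k) checks that 0..k-1 are all present, and a single count of elements != k decides the comparison with m; Pre_ excludes exactly the inputs where A raises IndexError (n beyond the list length with the answer not decided before the out-of-range index).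
import Mathlib
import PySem

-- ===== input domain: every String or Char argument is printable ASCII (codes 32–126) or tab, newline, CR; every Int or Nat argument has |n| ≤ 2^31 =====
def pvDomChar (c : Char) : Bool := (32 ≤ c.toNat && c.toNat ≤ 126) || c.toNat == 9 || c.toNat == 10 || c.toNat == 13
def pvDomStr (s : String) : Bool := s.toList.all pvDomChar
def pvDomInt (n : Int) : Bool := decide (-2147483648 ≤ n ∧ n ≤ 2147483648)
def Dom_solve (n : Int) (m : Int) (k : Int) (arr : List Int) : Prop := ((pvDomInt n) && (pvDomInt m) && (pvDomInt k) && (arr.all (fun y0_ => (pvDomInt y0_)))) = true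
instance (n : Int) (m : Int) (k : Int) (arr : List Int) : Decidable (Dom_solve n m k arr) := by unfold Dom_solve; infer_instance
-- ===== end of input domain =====

-- B replaces A's two index loops with break/continue and a running-mex state machine by closed-form
-- counting on the sorted prefix (a set of the values in [0,k) checks presence of 0..k-1; one count of
-- elements ≠ k decides m): objective 'simpler'. Note: Python A sorts arr IN PLACE (caller-visible
-- mutation); B does not — the equivalence proved here is about the return value only.

-- ===== PORT A =====
-- first loop: for i in range(n) over the sorted list, 'continue' on == k, 'break' on > k;
-- state (curr_mex, count)
def solveLoop1 (k : Int) : List Int → Int → Int → Int × Int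
  | [], mex, count => (mex, count)
  | x :: xs, mex, count =>
    if x = k then solveLoop1 k xs mex count
    else if x > k then (mex, count)
    else if x = mex then solveLoop1 k xs (mex + 1) (count + 1)
    else solveLoop1 k xs mex (count + 1)

-- second loop: for i in range(n-1,-1,-1), i.e. over the reversed prefix, break on <= k
def solveLoop2 (k : Int) : List Int → Int → Int
  | [], count => count
  | x :: xs, count => if x > k then solveLoop2 k xs (count + 1) else count

def solve (n : Int) (m : Int) (k : Int) (arr : List Int) : String :=
  if m < k then "NO"
  else
    let s := PySem.List.sorted arr (fun x => x) false
    -- the indices 0..n-1 both loops visit; take is the in-range guard (Pre_solve holds exactly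
    -- where Python's s[i] cannot raise, so no index leaves the list there)
    let pref := s.take n.toNat
    let r := solveLoop1 k pref 0 0
    if r.1 ≠ k then "NO"
    else if r.2 ≥ m then "YES"
    else if solveLoop2 k pref.reverse r.2 ≥ m then "YES" else "NO"

-- ===== PORT B =====
def solve_alt (n : Int) (m : Int) (k : Int) (arr : List Int) : String :=
  if m < k ∨ k < 0 then "NO"
  else
    let smallest := (PySem.List.sorted arr (fun x => x) false).take (max n 0).toNat
    let present := PySem.Set.ofList (smallest.filter (fun x => decide (0 ≤ x) && decide (x < k)))
    if (present.length : Int) < k then "NO"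
    else if ((smallest.countP (fun x => decide (x ≠ k)) : Int)) ≥ m then "YES" else "NO"

-- ===== PRECONDITION & SPEC =====
-- Exactly the inputs on which Python A returns (no IndexError): either n is within the list's length,
-- or the early 'NO' (m < k) fires, or the first loop breaks (some element > k) and the answer is
-- decided before the second loop indexes out of range (0..k-1 not all present, or enough elements < k).
def Pre_solve (n : Int) (m : Int) (k : Int) (arr : List Int) : Prop :=
  n ≤ (arr.length : Int) ∨ m < k ∨
    ((∃ x ∈ arr, k < x) ∧
      (¬ (0 ≤ k ∧ (PySem.Set.ofList (arr.filter (fun x => decide (0 ≤ x) && decide (x < k)))).length = k.toNat)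
        ∨ m ≤ (arr.countP (fun x => decide (x < k)) : Int)))
instance (n : Int) (m : Int) (k : Int) (arr : List Int) : Decidable (Pre_solve n m k arr) := by
  unfold Pre_solve; infer_instance

def pvWitness_solve : Int × Int × Int × List Int := (4, 2, 2, [0, 1, 5, 1])

def Spec_solve (n : Int) (m : Int) (k : Int) (arr : List Int) (out : String) : Prop := out = solve_alt n m k arr
instance (n : Int) (m : Int) (k : Int) (arr : List Int) (out : String) : Decidable (Spec_solve n m k arr out) := by unfold Spec_solve; infer_instance

-- ===== CLAIM (what is proved, stated in full; the proofs are below) =====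
def Claim_equal_solve : Prop := ∀ (n : Int) (m : Int) (k : Int) (arr : List Int), Dom_solve n m k arr → Pre_solve n m k arr → Spec_solve n m k arr (solve n m k arr)

-- ===== LEMMAS AND PROOFS =====

-- loop 1 never decreases curr_mex
theorem loop1_fst_ge (k : Int) : ∀ (b : List Int) (c cnt : Int), c ≤ (solveLoop1 k b c cnt).1 := by
  intro b
  induction b with
  | nil => intro c cnt; simp [solveLoop1]
  | cons x xs ih =>
    intro c cnt
    simp only [solveLoop1]
    split_ifs with h1 h2 h3
    · exact ih c cnt
    · simp
    · have := ih (c + 1) (cnt + 1); omega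
    · exact ih c (cnt + 1)

-- if no element equals the current mex, the mex never moves
theorem loop1_stuck (k : Int) : ∀ (b : List Int) (c cnt : Int), (∀ y ∈ b, y ≠ c) →
    (solveLoop1 k b c cnt).1 = c := by
  intro b
  induction b with
  | nil => intro c cnt _; simp [solveLoop1]
  | cons x xs ih =>
    intro c cnt hne
    simp only [solveLoop1]
    split_ifs with h1 h2 h3
    · exact ih c cnt (fun y hy => hne y (List.mem_cons_of_mem _ hy))
    · simp
    · exact absurd h3 (hne x (List.mem_cons_self))
    · exact ih c (cnt + 1) (fun y hy => hne y (List.mem_cons_of_mem _ hy))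

-- loop 1's count is the number of elements below k (sorted input: everything after the break exceeds k)
theorem loop1_snd (k : Int) : ∀ (b : List Int), b.Pairwise (· ≤ ·) → ∀ (c cnt : Int),
    (solveLoop1 k b c cnt).2 = cnt + (b.countP (fun x => decide (x < k)) : Int) := by
  intro b
  induction b with
  | nil => intro _ c cnt; simp [solveLoop1]
  | cons x xs ih =>
    intro hp c cnt
    rw [List.pairwise_cons] at hp
    obtain ⟨hall, hxs⟩ := hp
    simp only [solveLoop1]
    split_ifs with h1 h2 h3
    · rw [ih hxs c cnt, List.countP_cons]
      simp [h1]
    · have hz : (x :: xs).countP (fun x => decide (x < k)) = 0 := by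
        rw [List.countP_eq_zero]
        intro a ha
        rcases List.mem_cons.mp ha with h | h
        · subst h; simp; omega
        · have := hall a h; simp; omega
      rw [hz]; simp
    · rw [ih hxs (c + 1) (cnt + 1), List.countP_cons]
      have : x < k := by omega
      simp [this]; omega
    · rw [ih hxs c (cnt + 1), List.countP_cons]
      have : x < k := by omega
      simp [this]; omega

-- loop 1's final mex equals k exactly when every value in [c, k) occurs (sorted input)
theorem loop1_fst_eq_iff (k : Int) : ∀ (b : List Int), b.Pairwise (· ≤ ·) → ∀ (c cnt : Int),
    ((solveLoop1 k b c cnt).1 = k ↔ c ≤ k ∧ ∀ t : Int, c ≤ t → t < k → t ∈ b) := by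
  intro b
  induction b with
  | nil =>
    intro _ c cnt
    simp only [solveLoop1]
    constructor
    · rintro rfl; exact ⟨le_refl _, fun t h1 h2 => absurd h2 (by omega)⟩
    · rintro ⟨h1, h2⟩
      by_contra hne
      have hck : c < k := lt_of_le_of_ne h1 hne
      simpa using h2 c le_rfl hck
  | cons x xs ih =>
    intro hp c cnt
    rw [List.pairwise_cons] at hp
    obtain ⟨hall, hxs⟩ := hp
    simp only [solveLoop1]
    split_ifs with h1 h2 h3
    · subst h1
      rw [ih hxs c cnt]
      constructor
      · rintro ⟨ha, hb⟩
        exact ⟨ha, fun t ht1 ht2 => List.mem_cons_of_mem _ (hb t ht1 ht2)⟩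
      · rintro ⟨ha, hb⟩
        refine ⟨ha, fun t ht1 ht2 => ?_⟩
        rcases List.mem_cons.mp (hb t ht1 ht2) with h | h
        · omega
        · exact h
    · constructor
      · intro hck
        exact ⟨le_of_eq hck, fun t ht1 ht2 => absurd ht2 (by omega)⟩
      · rintro ⟨ha, hb⟩
        by_contra hne
        have hck : c < k := lt_of_le_of_ne ha hne
        rcases List.mem_cons.mp (hb c le_rfl hck) with h | h
        · omega
        · have := hall c h; omega
    · subst h3
      rw [ih hxs (x + 1) (cnt + 1)]
      have hxk : x < k := by omega
      constructor
      · rintro ⟨ha, hb⟩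
        refine ⟨by omega, fun t ht1 ht2 => ?_⟩
        rcases eq_or_lt_of_le ht1 with he | hl
        · rw [← he]; exact List.mem_cons_self
        · exact List.mem_cons_of_mem _ (hb t (by omega) ht2)
      · rintro ⟨ha, hb⟩
        refine ⟨by omega, fun t ht1 ht2 => ?_⟩
        rcases List.mem_cons.mp (hb t (by omega) ht2) with h | h
        · omega
        · exact h
    · have hxk : x < k := by omega
      by_cases hxc : x < c
      · rw [ih hxs c (cnt + 1)]
        constructor
        · rintro ⟨ha, hb⟩
          exact ⟨ha, fun t ht1 ht2 => List.mem_cons_of_mem _ (hb t ht1 ht2)⟩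
        · rintro ⟨ha, hb⟩
          refine ⟨ha, fun t ht1 ht2 => ?_⟩
          rcases List.mem_cons.mp (hb t ht1 ht2) with h | h
          · omega
          · exact h
      · -- c < x: every remaining element exceeds c, so the mex is stuck at c < k
        have hcx : c < x := by omega
        have hstuck : (solveLoop1 k xs c (cnt + 1)).1 = c :=
          loop1_stuck k xs c (cnt + 1) (fun y hy => by have := hall y hy; omega)
        rw [hstuck]
        constructor
        · intro h; omega
        · rintro ⟨ha, hb⟩
          exfalso
          rcases List.mem_cons.mp (hb c le_rfl (by omega)) with h | h
          · omega
          · have := hall c h; omega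

-- loop 2 on a descending list counts the elements above k
theorem loop2_eq (k : Int) : ∀ (r : List Int), r.Pairwise (fun a b => b ≤ a) → ∀ (cnt : Int),
    solveLoop2 k r cnt = cnt + (r.countP (fun x => decide (k < x)) : Int) := by
  intro r
  induction r with
  | nil => intro _ cnt; simp [solveLoop2]
  | cons x xs ih =>
    intro hp cnt
    rw [List.pairwise_cons] at hp
    obtain ⟨hall, hxs⟩ := hp
    simp only [solveLoop2]
    split_ifs with h1
    · rw [ih hxs (cnt + 1), List.countP_cons]
      simp [h1]; omega
    · have hz : (x :: xs).countP (fun x => decide (k < x)) = 0 := by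
        rw [List.countP_eq_zero]
        intro a ha
        rcases List.mem_cons.mp ha with h | h
        · subst h; simp; omega
        · have := hall a h; simp; omega
      rw [hz]; simp

-- elements ≠ k split into elements < k and elements > k
theorem countP_ne_split (k : Int) : ∀ (l : List Int),
    l.countP (fun x => decide (x ≠ k)) =
      l.countP (fun x => decide (x < k)) + l.countP (fun x => decide (k < x)) := by
  intro l
  induction l with
  | nil => simp
  | cons x xs ih =>
    simp only [List.countP_cons, ih, decide_eq_true_eq]
    split_ifs <;> omega

-- the set of values in [0, k) has k elements exactly when 0..k-1 are all present
theorem present_card (k : Int) (hk : 0 ≤ k) (b : List Int) :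
    (((PySem.Set.ofList (b.filter (fun x => decide (0 ≤ x) && decide (x < k)))).length : Int) < k)
      ↔ ¬ (∀ t : Int, 0 ≤ t → t < k → t ∈ b) := by
  set F := PySem.Set.ofList (b.filter (fun x => decide (0 ≤ x) && decide (x < k))) with hF
  have hnd : F.Nodup := PySem.Set.nodup_ofList _
  have hmem : ∀ t : Int, t ∈ F ↔ (t ∈ b ∧ 0 ≤ t ∧ t < k) := by
    intro t
    rw [hF, PySem.Set.mem_ofList, List.mem_filter]
    simp
  have hcard : F.toFinset.card = F.length := List.toFinset_card_of_nodup hnd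
  have hsub : F.toFinset ⊆ Finset.Ico (0 : ℤ) k := by
    intro t ht
    rw [List.mem_toFinset] at ht
    rw [Finset.mem_Ico]
    exact ((hmem t).mp ht).2
  have hico : (Finset.Ico (0 : ℤ) k).card = k.toNat := by
    rw [Int.card_Ico]; simp
  constructor
  · intro hlt hall
    have hsup : Finset.Ico (0 : ℤ) k ⊆ F.toFinset := by
      intro t ht
      rw [Finset.mem_Ico] at ht
      rw [List.mem_toFinset, hmem]
      exact ⟨hall t ht.1 ht.2, ht.1, ht.2⟩
    have := Finset.card_le_card hsup
    omega
  · intro hnall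
    by_contra hge
    have heq : F.toFinset = Finset.Ico (0 : ℤ) k :=
      Finset.eq_of_subset_of_card_le hsub (by omega)
    apply hnall
    intro t ht1 ht2
    have : t ∈ F.toFinset := heq ▸ Finset.mem_Ico.mpr ⟨ht1, ht2⟩
    exact ((hmem t).mp (List.mem_toFinset.mp this)).1

-- the branch structure of A past the early 'NO's equals the branch structure of B, over any
-- sorted prefix
theorem core_eq (m k : Int) (pref : List Int) (hs : pref.Pairwise (· ≤ ·)) (hk : 0 ≤ k) :
    (if (solveLoop1 k pref 0 0).1 ≠ k then "NO"
     else if (solveLoop1 k pref 0 0).2 ≥ m then "YES"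
     else if solveLoop2 k pref.reverse (solveLoop1 k pref 0 0).2 ≥ m then "YES" else "NO")
    = (if ((PySem.Set.ofList (pref.filter (fun x => decide (0 ≤ x) && decide (x < k)))).length : Int) < k
        then "NO"
       else if ((pref.countP (fun x => decide (x ≠ k)) : Int)) ≥ m then "YES" else "NO") := by
  have hmex := loop1_fst_eq_iff k pref hs 0 0
  have hcnt := loop1_snd k pref hs 0 0
  have hpres := present_card k hk pref
  by_cases hall : ∀ t : Int, 0 ≤ t → t < k → t ∈ pref
  · have hm1 : (solveLoop1 k pref 0 0).1 = k := hmex.mpr ⟨hk, hall⟩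
    have hnp : ¬ (((PySem.Set.ofList
        (pref.filter (fun x => decide (0 ≤ x) && decide (x < k)))).length : Int) < k) := by
      rw [hpres]; exact not_not_intro hall
    rw [if_neg (not_not_intro hm1), if_neg hnp]
    have hrev : pref.reverse.Pairwise (fun a b => b ≤ a) := List.pairwise_reverse.mpr hs
    rw [loop2_eq k pref.reverse hrev _, List.countP_reverse, hcnt]
    have hsplit := countP_ne_split k pref
    split_ifs <;> first | rfl | (exfalso; omega)
  · have hm1 : (solveLoop1 k pref 0 0).1 ≠ k := fun h => hall (hmex.mp h).2
    rw [if_pos hm1, if_pos (hpres.mpr hall)]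

-- the two ports agree on every input (the precondition only delimits where Python A returns)
theorem solve_eq_alt (n m k : Int) (arr : List Int) : solve n m k arr = solve_alt n m k arr := by
  simp only [solve, solve_alt]
  by_cases hmk : m < k
  · simp [hmk]
  · by_cases hk : k < 0
    · rw [if_neg hmk, if_pos (Or.inr hk)]
      have h0 : (0 : Int) ≤
          (solveLoop1 k ((PySem.List.sorted arr (fun x => x) false).take n.toNat) 0 0).1 :=
        loop1_fst_ge k _ 0 0
      rw [if_pos (by omega)]
    · have hmax : (max n 0).toNat = n.toNat := by omega
      rw [if_neg hmk, if_neg (not_or.mpr ⟨hmk, hk⟩), hmax]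
      have hsorted : ((PySem.List.sorted arr (fun x => x) false).take n.toNat).Pairwise (· ≤ ·) :=
        List.Pairwise.sublist (List.take_sublist _ _) (PySem.List.sorted_pairwise arr (fun x : Int => x))
      exact core_eq m k _ hsorted (by omega)

-- ===== VERDICT (by name: the statement is the Claim_ definition above) =====
theorem solve_spec : Claim_equal_solve := by
  intro n m k arr _ _
  unfold Spec_solve
  exact solve_eq_alt n m k arr
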